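-- pv_equiv track=rewrite | github.com/shovarnu2022/DSA_Problem_solving | python_problems/hotels_booking_possible.py | hotel_booking
-- ===== SOURCE A (Python) =====
-- def hotel_booking(arrival, depart, K):
--     event = []
--     for i in range(0, len(arrival)):
--         t_arrive = ()
--         t_arrive = t_arrive + (arrival[i], "RED")
--         event.append(t_arrive)
--
--     for i in range(0, len(depart)):
--         t_depart = ()
--         t_depart = t_depart + (depart[i], "BLUE")
--         event.append(t_depart)
--     event = sorted(event)
--
--     guest = 0
--     for e in event:
--         if e[1] == 'RED':
--             guest += 1
--         else:
--             guest -= 1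
--
--         if guest > K:
--             return 0
--     return 1
-- ===== SOURCE B (Python) =====
-- def hotel_booking(arrival, depart, K):
--     arr = sorted(arrival)
--     dep = sorted(depart)
--     i = j = 0
--     guest = 0
--     while i < len(arr) or j < len(dep):
--         if i < len(arr) and (j >= len(dep) or arr[i] < dep[j]):
--             guest += 1
--             i += 1
--         else:
--             guest -= 1
--             j += 1
--         if guest > K:
--             return 0
--     return 1
-- ===== Notes on version B (the rewrite author's own statement) =====
-- stated objective: alternative
-- what changed: B replaces A's tagged-tuple event list and single lexicographic sort of all events by two separate sorts of arrival/depart and a two-pointer merge that counts occupancy in one linear pass (departures win ties via strict <).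
import Mathlib
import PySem

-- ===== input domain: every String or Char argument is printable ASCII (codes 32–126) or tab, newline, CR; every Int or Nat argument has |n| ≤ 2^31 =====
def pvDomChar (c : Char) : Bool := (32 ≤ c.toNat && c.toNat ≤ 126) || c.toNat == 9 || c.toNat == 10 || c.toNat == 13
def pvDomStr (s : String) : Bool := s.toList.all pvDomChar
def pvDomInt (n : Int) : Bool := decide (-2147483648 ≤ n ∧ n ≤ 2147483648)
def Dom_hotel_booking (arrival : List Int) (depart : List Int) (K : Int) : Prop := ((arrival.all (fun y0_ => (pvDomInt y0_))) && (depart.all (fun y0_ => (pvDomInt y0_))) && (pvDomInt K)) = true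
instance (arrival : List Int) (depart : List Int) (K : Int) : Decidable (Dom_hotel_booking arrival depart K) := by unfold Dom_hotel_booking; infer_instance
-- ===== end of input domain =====

-- B replaces A's tagged-tuple event list + one lexicographic sort of all events by two sorts and a
-- two-pointer merge counting occupancy in one linear pass (departures win ties); return value only, same results.

-- ===== PORT A =====
-- the 'for e in event' scan with its early 'return 0'
def hb_scanA (K : Int) (guest : Int) : List (Int × String) → Int
  | [] => 1
  | e :: rest =>
    let g := if e.2 == "RED" then guest + 1 else guest - 1
    if g > K then 0 else hb_scanA K g rest

def hotel_booking (arrival : List Int) (depart : List Int) (K : Int) : Int :=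
  let event := arrival.foldl (fun acc a => acc ++ [(a, "RED")]) []
  let event := depart.foldl (fun acc d => acc ++ [(d, "BLUE")]) event
  let event := PySem.List.sorted2 event (fun e => e.1) (fun e => e.2)
  hb_scanA K 0 event

-- ===== PORT B =====
-- Source B's while-loop: the two index pointers i/j are rendered as the two remaining suffixes of arr/dep
def hb_loop (K : Int) (guest : Int) : List Int → List Int → Int
  | [], [] => 1
  | a :: arest, [] =>
      let g := guest + 1
      if g > K then 0 else hb_loop K g arest []
  | [], _ :: drest =>
      let g := guest - 1
      if g > K then 0 else hb_loop K g [] drest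
  | a :: arest, d :: drest =>
      if a < d then
        let g := guest + 1
        if g > K then 0 else hb_loop K g arest (d :: drest)
      else
        let g := guest - 1
        if g > K then 0 else hb_loop K g (a :: arest) drest
  termination_by arr dep => arr.length + dep.length

def hotel_booking_alt (arrival : List Int) (depart : List Int) (K : Int) : Int :=
  hb_loop K 0 (PySem.List.sorted arrival (fun x => x)) (PySem.List.sorted depart (fun x => x))

-- ===== PRECONDITION & SPEC =====
def Spec_hotel_booking (arrival : List Int) (depart : List Int) (K : Int) (out : Int) : Prop := out = hotel_booking_alt arrival depart K
instance (arrival : List Int) (depart : List Int) (K : Int) (out : Int) : Decidable (Spec_hotel_booking arrival depart K out) := by unfold Spec_hotel_booking; infer_instance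

-- ===== CLAIM (what is proved, stated in full; the proofs are below) =====
def Claim_equal_hotel_booking : Prop := ∀ (arrival : List Int) (depart : List Int) (K : Int), Dom_hotel_booking arrival depart K → Spec_hotel_booking arrival depart K (hotel_booking arrival depart K)

-- ===== LEMMAS AND PROOFS =====

-- the merged event sequence B walks through (proof-only; neither port uses it)
def hb_merge : List Int → List Int → List (Int × String)
  | as, [] => as.map (fun a => (a, "RED"))
  | [], d :: ds => (d, "BLUE") :: hb_merge [] ds
  | a :: as, d :: ds =>
      if a < d then (a, "RED") :: hb_merge as (d :: ds)
      else (d, "BLUE") :: hb_merge (a :: as) ds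
  termination_by as ds => as.length + ds.length

-- total lexicographic key Python compares the event tuples by
def hb_key (e : Int × String) : Lex (Int × String) := toLex (e.1, e.2)

lemma hb_merge_perm (as ds : List Int) :
    (hb_merge as ds).Perm (as.map (fun a => (a, "RED")) ++ ds.map (fun d => (d, "BLUE"))) := by
  fun_induction hb_merge with
  | case1 as => simp
  | case2 d ds ih => simpa using ih.cons ((d : Int), ("BLUE" : String))
  | case3 a as d ds h ih => simpa using ih.cons ((a : Int), ("RED" : String))
  | case4 a as d ds h ih =>
      refine List.Perm.trans (ih.cons _) ?_
      simpa using (List.perm_middle (a := ((d : Int), ("BLUE" : String)))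
        (l₁ := (a, "RED") :: as.map (fun a => (a, "RED"))) (l₂ := ds.map fun d => (d, "BLUE"))).symm

lemma hb_mem_merge {x : Int × String} {as ds : List Int} (hx : x ∈ hb_merge as ds) :
    (x.1 ∈ as ∧ x.2 = "RED") ∨ (x.1 ∈ ds ∧ x.2 = "BLUE") := by
  have := (hb_merge_perm as ds).mem_iff.mp hx
  rcases List.mem_append.mp this with h | h
  · obtain ⟨a, ha, rfl⟩ := List.mem_map.mp h
    exact Or.inl ⟨ha, rfl⟩
  · obtain ⟨d, hd, rfl⟩ := List.mem_map.mp h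
    exact Or.inr ⟨hd, rfl⟩

lemma hb_BR : ("BLUE" : String) ≤ "RED" := le_of_lt (by rw [String.lt_iff_toList_lt]; decide)

lemma hb_merge_pairwise (as ds : List Int)
    (has : as.Pairwise (· ≤ ·)) (hds : ds.Pairwise (· ≤ ·)) :
    (hb_merge as ds).Pairwise (fun x y => hb_key x ≤ hb_key y) := by
  fun_induction hb_merge with
  | case1 as =>
      refine List.Pairwise.map _ (fun a b hab => ?_) has
      simp only [hb_key, Prod.Lex.toLex_le_toLex]
      rcases eq_or_lt_of_le hab with heq | hlt
      · exact Or.inr ⟨heq, le_refl _⟩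
      · exact Or.inl hlt
  | case2 d ds ih =>
      rcases List.pairwise_cons.mp hds with ⟨hd, hds'⟩
      refine List.pairwise_cons.mpr ⟨fun y hy => ?_, ih has hds'⟩
      rcases hb_mem_merge hy with ⟨h1, h2⟩ | ⟨h1, h2⟩
      · simp at h1
      · have := hd _ h1
        simp only [hb_key, Prod.Lex.toLex_le_toLex, h2]
        rcases eq_or_lt_of_le this with heq | hlt
        · exact Or.inr ⟨heq, le_refl _⟩
        · exact Or.inl hlt
  | case3 a as d ds h ih =>
      rcases List.pairwise_cons.mp has with ⟨ha, has'⟩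
      rcases List.pairwise_cons.mp hds with ⟨hd, hds'⟩
      refine List.pairwise_cons.mpr ⟨fun y hy => ?_, ih has' hds⟩
      rcases hb_mem_merge hy with ⟨h1, h2⟩ | ⟨h1, h2⟩
      · have := ha _ h1
        simp only [hb_key, Prod.Lex.toLex_le_toLex, h2]
        rcases eq_or_lt_of_le this with heq | hlt
        · exact Or.inr ⟨heq, le_refl _⟩
        · exact Or.inl hlt
      · have hdy : d ≤ y.1 := by
          rcases List.mem_cons.mp h1 with rfl | h1'
          · exact le_refl _
          · exact hd _ h1'
        have hay : a < y.1 := by omega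
        simp only [hb_key, Prod.Lex.toLex_le_toLex, h2]
        exact Or.inl hay
  | case4 a as d ds h ih =>
      rcases List.pairwise_cons.mp hds with ⟨hd, hds'⟩
      rcases List.pairwise_cons.mp has with ⟨ha, has'⟩
      refine List.pairwise_cons.mpr ⟨fun y hy => ?_, ih has hds'⟩
      have hda : d ≤ a := by omega
      rcases hb_mem_merge hy with ⟨h1, h2⟩ | ⟨h1, h2⟩
      · have hay : a ≤ y.1 := by
          rcases List.mem_cons.mp h1 with rfl | h1'
          · exact le_refl _
          · exact ha _ h1'
        have hdy : d ≤ y.1 := le_trans hda hay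
        rcases lt_or_eq_of_le hdy with hlt | heq
        · simp only [hb_key, Prod.Lex.toLex_le_toLex, h2]
          exact Or.inl hlt
        · simp only [hb_key, Prod.Lex.toLex_le_toLex, h2]
          exact Or.inr ⟨heq, hb_BR⟩
      · have := hd _ h1
        simp only [hb_key, Prod.Lex.toLex_le_toLex, h2]
        rcases eq_or_lt_of_le this with heq | hlt
        · exact Or.inr ⟨heq, le_refl _⟩
        · exact Or.inl hlt

lemma hb_key_injective : Function.Injective hb_key := by
  intro x y hxy
  have : (x.1, x.2) = (y.1, y.2) := toLex.injective hxy
  cases x; cases y; simpa using this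

-- Python's tuple comparison on events IS the 'sorted' under the lexicographic key
lemma hb_sorted2_eq_sorted (xs : List (Int × String)) :
    PySem.List.sorted2 xs (fun e => e.1) (fun e => e.2) = PySem.List.sorted xs hb_key := by
  have hbe : (fun (a b : Int × String) =>
        (decide (a.1 < b.1) || (!decide (b.1 < a.1) && decide (a.2 < b.2))))
      = (fun (a b : Int × String) => decide (hb_key a < hb_key b)) := by
    funext a b
    by_cases h1 : a.1 < b.1
    · simp [hb_key, Prod.Lex.toLex_lt_toLex, h1]
    · by_cases h2 : b.1 < a.1
      · have h3 : ¬ a.1 = b.1 := by omega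
        simp [hb_key, Prod.Lex.toLex_lt_toLex, h1, h2, h3]
      · have h3 : a.1 = b.1 := by omega
        simp [hb_key, Prod.Lex.toLex_lt_toLex, h3]
  rw [PySem.List.sorted_eq_foldl_insertBy]
  show List.foldl (fun acc x => PySem.List.insertBy
      (fun a b => (decide (a.1 < b.1) || (!decide (b.1 < a.1) && decide (a.2 < b.2)))) x acc) [] xs = _
  rw [hbe]

lemma hb_sorted_event_eq_merge (arrival depart : List Int) :
    PySem.List.sorted2 (arrival.map (fun a => (a, "RED")) ++ depart.map (fun d => (d, "BLUE")))
      (fun e => e.1) (fun e => e.2)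
    = hb_merge (PySem.List.sorted arrival (fun x => x)) (PySem.List.sorted depart (fun x => x)) := by
  rw [hb_sorted2_eq_sorted]
  apply PySem.List.eq_of_perm_of_pairwise_le_of_injective hb_key hb_key_injective
  · refine ((PySem.List.sorted_perm _ _ _).trans ?_).trans (hb_merge_perm _ _).symm
    exact List.Perm.append ((PySem.List.sorted_perm arrival (fun x => x) false).map _).symm
      ((PySem.List.sorted_perm depart (fun x => x) false).map _).symm
  · exact PySem.List.sorted_pairwise _ _
  · exact hb_merge_pairwise _ _
      (by simpa using PySem.List.sorted_pairwise arrival (fun x => x))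
      (by simpa using PySem.List.sorted_pairwise depart (fun x => x))

-- scanning the merged event list is exactly B's two-pointer loop
lemma hb_scan_merge (as ds : List Int) (K : Int) :
    ∀ g : Int, hb_scanA K g (hb_merge as ds) = hb_loop K g as ds := by
  fun_induction hb_merge with
  | case1 as =>
      intro g
      induction as generalizing g with
      | nil => simp [hb_scanA, hb_loop]
      | cons a t ih =>
          show hb_scanA K g ((a, "RED") :: t.map _) = _
          simp only [hb_scanA, hb_loop]
          split <;> simp_all
  | case2 d ds ih =>
      intro g
      show hb_scanA K g ((d, "BLUE") :: hb_merge [] ds) = _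
      simp only [hb_scanA, hb_loop]
      split <;> simp_all
  | case3 a as d ds h ih =>
      intro g
      rw [show hb_loop K g (a :: as) (d :: ds) = (if g + 1 > K then 0 else hb_loop K (g + 1) as (d :: ds)) from by
        simp [hb_loop, h]]
      simp only [hb_scanA]
      split <;> simp_all
  | case4 a as d ds h ih =>
      intro g
      rw [show hb_loop K g (a :: as) (d :: ds) = (if g - 1 > K then 0 else hb_loop K (g - 1) (a :: as) ds) from by
        simp [hb_loop, h]]
      simp only [hb_scanA]
      split <;> simp_all

-- ===== VERDICT (by name: the statement is the Claim_ definition above) =====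
theorem hotel_booking_spec : Claim_equal_hotel_booking := by
  intro arrival depart K _
  show hotel_booking arrival depart K = hotel_booking_alt arrival depart K
  unfold hotel_booking hotel_booking_alt
  simp only [PySem.List.foldl_append_singleton_eq_map, List.nil_append]
  rw [hb_sorted_event_eq_merge, hb_scan_merge]
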